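-- pv_equiv track=rewrite | github.com/981377660LMT/algorithm-study | 22_专题/前缀与差分/差分数组/离散化/DiscretizeSpecial.py | discretizeSpecial
-- ===== SOURCE A (Python) =====
-- from typing import List, Tuple
--
-- def discretizeSpecial(n: int, isSpecial: List[bool]) -> Tuple[List[int], List[int]]:
--     """Discretize arr to id array.
--
--     >>> discretizeSpecial(5, [True, False, True, False, True])
--     ([0, -1, 1, -1, 2], [0, 2, 4])
--     """
--     vToId = [-1] * n
--     idToV = []
--     for i in range(n):
--         if isSpecial[i]:
--             vToId[i] = len(idToV)
--             idToV.append(i)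
--     return vToId, idToV
-- ===== SOURCE B (Python) =====
-- from typing import List, Tuple
--
-- def discretizeSpecial(n: int, isSpecial: List[bool]) -> Tuple[List[int], List[int]]:
--     # Prefix-sum algorithm: ids are computed arithmetically from the running
--     # count of special flags instead of being handed out by an appending counter.
--     flags = [1 if isSpecial[i] else 0 for i in range(n)]
--     s = 0
--     prefix = [(s := s + f) for f in flags]
--     vToId = [p - 1 if f else -1 for f, p in zip(flags, prefix)]
--     idToV = [i for i, f in zip(range(n), flags) if f]
--     return vToId, idToV
-- ===== Notes on version B (the rewrite author's own statement) =====
-- stated objective: alternative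
-- what changed: Ids are no longer handed out by an appending counter during a stateful scan: B computes a 0/1 flag list, takes its running prefix sums, and derives vToId pointwise as prefix-1 (or -1) and idToV by zipping the indices with the flags, so the compact ids come from arithmetic on cumulative counts rather than from mutation of a growing list.
import Mathlib
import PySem

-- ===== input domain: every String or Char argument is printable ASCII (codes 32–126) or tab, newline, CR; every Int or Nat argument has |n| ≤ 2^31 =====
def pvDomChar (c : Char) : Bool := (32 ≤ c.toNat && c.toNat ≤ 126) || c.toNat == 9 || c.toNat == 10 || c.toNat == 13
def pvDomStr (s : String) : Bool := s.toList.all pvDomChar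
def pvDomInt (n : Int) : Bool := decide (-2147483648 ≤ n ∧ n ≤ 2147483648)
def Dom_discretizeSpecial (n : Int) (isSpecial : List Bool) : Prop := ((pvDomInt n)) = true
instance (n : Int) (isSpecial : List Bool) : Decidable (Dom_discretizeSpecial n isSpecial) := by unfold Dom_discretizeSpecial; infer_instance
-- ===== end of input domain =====

-- B replaces A's stateful scan (appending counter + in-place writes) by a
-- prefix-sum computation: ids come from running sums of 0/1 flags (alternative algorithm).


-- ===== PORT A =====
def discretizeSpecial (n : Int) (isSpecial : List Bool) : List Int × List Int :=
  (PySem.List.pyRange 0 n 1).foldl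
    (fun st i =>
      if PySem.List.pyGetD isSpecial i false then
        (PySem.List.pySetD st.1 i (st.2.length : Int), st.2 ++ [i])
      else st)
    (List.replicate n.toNat (-1 : Int), ([] : List Int))

-- ===== PORT B =====
def discretizeSpecial_alt (n : Int) (isSpecial : List Bool) : List Int × List Int :=
  let l := PySem.List.pyRange 0 n 1
  let flags : List Int :=
    l.map (fun i => if PySem.List.pyGetD isSpecial i false then (1 : Int) else 0)
  -- walrus comprehension 'prefix = [(s := s + f) for f in flags]' as a fold carrying s
  let prefixSums : List Int :=
    (flags.foldl (fun st f => (st.1 + f, st.2 ++ [st.1 + f])) ((0 : Int), ([] : List Int))).2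
  let vToId : List Int :=
    (flags.zip prefixSums).map (fun q => if q.1 ≠ 0 then q.2 - 1 else -1)
  let idToV : List Int :=
    ((l.zip flags).filter (fun q => q.2 ≠ 0)).map (fun q => q.1)
  (vToId, idToV)

-- ===== PRECONDITION & SPEC =====
-- A raises IndexError as soon as the loop reaches an index past the end of isSpecial,
-- i.e. whenever n exceeds the list length; Pre_ excludes exactly those inputs.
def Pre_discretizeSpecial (n : Int) (isSpecial : List Bool) : Prop := n ≤ (isSpecial.length : Int)
instance (n : Int) (isSpecial : List Bool) : Decidable (Pre_discretizeSpecial n isSpecial) := by unfold Pre_discretizeSpecial; infer_instance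
def pvWitness_discretizeSpecial : Int × List Bool := (3, [true, false, true])
def Spec_discretizeSpecial (n : Int) (isSpecial : List Bool) (out : List Int × List Int) : Prop := out = discretizeSpecial_alt n isSpecial
instance (n : Int) (isSpecial : List Bool) (out : List Int × List Int) : Decidable (Spec_discretizeSpecial n isSpecial out) := by unfold Spec_discretizeSpecial; infer_instance

-- ===== CLAIM (what is proved, stated in full; the proofs are below) =====
def Claim_equal_discretizeSpecial : Prop := ∀ (n : Int) (isSpecial : List Bool), Dom_discretizeSpecial n isSpecial → Pre_discretizeSpecial n isSpecial → Spec_discretizeSpecial n isSpecial (discretizeSpecial n isSpecial)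

-- ===== LEMMAS AND PROOFS =====

-- Canonical id list: position i gets the next id s if special, else -1.
def pvCanonV (p : Int → Bool) (s : Int) : List Int → List Int
  | [] => []
  | i :: rest => if p i then s :: pvCanonV p (s + 1) rest else -1 :: pvCanonV p s rest

-- the walrus fold produces exactly the running prefix sums
def pvGAcc (s : Int) : List Int → List Int
  | [] => []
  | x :: xs => (s + x) :: pvGAcc (s + x) xs

theorem pvFoldlAcc (l : List Int) (s : Int) (out : List Int) :
    (l.foldl (fun st f => (st.1 + f, st.2 ++ [st.1 + f])) (s, out)).2 = out ++ pvGAcc s l := by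
  induction l generalizing s out with
  | nil => simp [pvGAcc]
  | cons x xs ih => simp [pvGAcc, ih]

-- B's vToId (zip of flags with their prefix sums) is the canonical id list
theorem pvAltVToId (p : Int → Bool) (l : List Int) (s : Int) :
    (((l.map (fun i => if p i then (1 : Int) else 0)).zip
        (pvGAcc s (l.map (fun i => if p i then (1 : Int) else 0)))).map
      (fun q => if q.1 ≠ 0 then q.2 - 1 else -1)) = pvCanonV p s l := by
  induction l generalizing s with
  | nil => simp [pvCanonV]
  | cons i rest ih =>
    by_cases h : p i
    · simp [pvCanonV, pvGAcc, h]
      simpa using ih (s + 1)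
    · simp [pvCanonV, pvGAcc, h]
      simpa using ih s

-- B's idToV (indices zipped with flags, filtered) is the plain filter
theorem pvAltIdToV (p : Int → Bool) (l : List Int) :
    (((l.zip (l.map (fun i => if p i then (1 : Int) else 0))).filter
        (fun q => q.2 ≠ 0)).map (fun q => q.1)) = l.filter p := by
  induction l with
  | nil => simp
  | cons i rest ih =>
    by_cases h : p i
    · simp [h]
      simpa using ih
    · simp [h]
      simpa using ih

-- Characterisation of A's fused fold over the index range [k, k+m):
-- the already-filled prefix 'done' stays, the replicate tail becomes the canonical
-- id list, and the collected specials are the filtered range.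
theorem pvACharacterisation (p : Int → Bool) (m : Nat) :
    ∀ (k : Nat) (done acc : List Int), done.length = k →
    (PySem.List.pyRange (k : Int) ((k : Int) + (m : Int)) 1).foldl
      (fun st i =>
        if p i then (PySem.List.pySetD st.1 i (st.2.length : Int), st.2 ++ [i]) else st)
      (done ++ List.replicate m (-1 : Int), acc)
    = (done ++ pvCanonV p (acc.length : Int)
          (PySem.List.pyRange (k : Int) ((k : Int) + (m : Int)) 1),
       acc ++ (PySem.List.pyRange (k : Int) ((k : Int) + (m : Int)) 1).filter p) := by
  induction m with
  | zero =>
    intro k done acc hlen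
    rw [PySem.List.pyRange_one_eq_nil (by omega)]
    simp [pvCanonV]
  | succ m ih =>
    intro k done acc hlen
    rw [PySem.List.pyRange_one_cons (by omega : (k : Int) < (k : Int) + ((m : Nat) + 1 : Nat))]
    have hrange : ((k : Int) + 1) = ((k + 1 : Nat) : Int) := by push_cast; ring
    have hhi : ((k : Int) + ((m : Nat) + 1 : Nat) : Int) = ((k + 1 : Nat) : Int) + (m : Int) := by
      push_cast; ring
    by_cases h : p k
    · simp only [List.foldl_cons, h, if_pos]
      have hset : PySem.List.pySetD (done ++ List.replicate (m + 1) (-1 : Int)) (k : Int)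
          (acc.length : Int) = (done ++ [(acc.length : Int)]) ++ List.replicate m (-1 : Int) := by
        rw [PySem.List.pySetD_natCast, List.set_append_right _ _ (by omega)]
        simp [hlen, List.replicate_succ]
      rw [hset, hrange, hhi, ih (k + 1) (done ++ [(acc.length : Int)]) (acc ++ [(k : Int)])
        (by simp [hlen])]
      rw [← hhi, ← hrange]
      simp [pvCanonV, h]
    · simp only [List.foldl_cons, h, if_neg, Bool.false_eq_true, not_false_iff]
      have hrep : done ++ List.replicate (m + 1) (-1 : Int)
          = (done ++ [(-1 : Int)]) ++ List.replicate m (-1 : Int) := by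
        rw [List.replicate_succ]; simp
      rw [hrep, hrange, hhi, ih (k + 1) (done ++ [(-1 : Int)]) acc (by simp [hlen])]
      rw [← hhi, ← hrange]
      simp [pvCanonV, h]

-- ===== VERDICT (by name: the statement is the Claim_ definition above) =====
theorem discretizeSpecial_spec : Claim_equal_discretizeSpecial := by
  intro n isSpecial _ _
  unfold Spec_discretizeSpecial
  simp only [discretizeSpecial, discretizeSpecial_alt]
  by_cases hn : n ≤ 0
  · rw [PySem.List.pyRange_one_eq_nil (by omega)]
    simp [Int.toNat_of_nonpos hn]
  · have hR : PySem.List.pyRange 0 n 1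
        = PySem.List.pyRange 0 ((0 : Int) + (n.toNat : Int)) 1 := by
      rw [show (0 : Int) + (n.toNat : Int) = n by omega]
    rw [hR]
    have hA := pvACharacterisation (fun i => PySem.List.pyGetD isSpecial i false) n.toNat 0 [] [] rfl
    simp only [List.nil_append, List.length_nil, Nat.cast_zero] at hA
    rw [hA, pvFoldlAcc]
    simp only [List.nil_append]
    rw [pvAltVToId (fun i => PySem.List.pyGetD isSpecial i false),
      pvAltIdToV (fun i => PySem.List.pyGetD isSpecial i false)]
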